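-- pv_equiv track=rewrite | github.com/combes-group/sircuitenum | sircuitenum/utils.py | combine_redundant_edges
-- ===== SOURCE A (Python) =====
-- def combine_redundant_edges(circuit: list, edges: list):
--     """
--     Combines edges that are between the same two nodes
--
--     Args:
--         circuit (list): a list of element labels for the desired circuit
--                         e.g. [["J"],["L", "J"], ["C"]]
--         edges (list): a list of edge connections for the desired circuit
--                         e.g. [(0,1), (0,2), (1,2)]
--
--     Returns:
--         New version of circuit/edges with any redundant edges combined.
--         If multiple edges have the same element, then a single
--
--     """
--     edge_dict = {}
--     for i in range(len(edges)):
--         edge = tuple(sorted(edges[i]))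
--         comps = circuit[i]
--         if edge in edge_dict:
--             edge_dict[edge] = edge_dict[edge] + comps
--         else:
--             edge_dict[edge] = comps
--     new_edges = list(edge_dict.keys())
--     new_circuit = [tuple(sorted(set(edge_dict[x]))) for x in new_edges]
--
--     return new_circuit, new_edges
-- ===== SOURCE B (Python) =====
-- def combine_redundant_edges(circuit: list, edges: list):
--     """Gather-based rewrite: first list the distinct normalized edges in
--     first-appearance order, then for each one rescan and concatenate the
--     matching component lists."""
--     norm = [tuple(sorted(e)) for e in edges]
--     new_edges = []
--     for e in norm:
--         if e not in new_edges:
--             new_edges.append(e)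
--     new_circuit = []
--     for e in new_edges:
--         comps = []
--         for ne, c in zip(norm, circuit):
--             if ne == e:
--                 comps = comps + c
--         new_circuit.append(tuple(sorted(set(comps))))
--     return new_circuit, new_edges
-- ===== Notes on version B (the rewrite author's own statement) =====
-- stated objective: alternative
-- what changed: Replaces the single-pass dict that accumulates component lists per normalized edge with a two-phase build-unique-keys-then-gather-by-rescan structure (no dict at all).
import Mathlib
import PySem

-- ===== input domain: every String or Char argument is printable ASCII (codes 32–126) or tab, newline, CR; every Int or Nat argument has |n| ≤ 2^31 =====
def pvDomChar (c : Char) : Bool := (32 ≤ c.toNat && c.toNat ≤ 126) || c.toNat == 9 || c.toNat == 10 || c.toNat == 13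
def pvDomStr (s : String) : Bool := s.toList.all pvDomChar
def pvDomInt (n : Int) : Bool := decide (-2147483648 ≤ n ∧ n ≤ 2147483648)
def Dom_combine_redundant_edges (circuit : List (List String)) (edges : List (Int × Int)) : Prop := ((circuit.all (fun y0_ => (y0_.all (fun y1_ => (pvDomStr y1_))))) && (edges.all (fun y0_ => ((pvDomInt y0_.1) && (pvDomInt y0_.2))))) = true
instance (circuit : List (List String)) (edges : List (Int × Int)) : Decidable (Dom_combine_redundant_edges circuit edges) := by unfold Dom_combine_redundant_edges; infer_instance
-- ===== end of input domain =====

-- B replaces A's single-pass accumulating dict by a build-unique-keys-then-gather-by-rescan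
-- structure of similar size (objective: alternative, not faster).


-- tuple(sorted(edges[i])) on a 2-tuple of ints
def pvNormEdge (p : Int × Int) : Int × Int := if p.2 < p.1 then (p.2, p.1) else p

-- ===== PORT A =====
-- A's 'for i in range(len(edges))' loop reads edges[i] and circuit[i] in step;
-- under Pre_ (len(edges) ≤ len(circuit)) it is exactly a fold over zip(edges, circuit)
def pvEdgeDict (circuit : List (List String)) (edges : List (Int × Int)) : PySem.Dict (Int × Int) (List String) :=
  (edges.zip circuit).foldl (fun d p =>
    let edge := pvNormEdge p.1
    match d.get? edge with
    | some v => d.insert edge (v ++ p.2)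
    | none => d.insert edge p.2) PySem.Dict.empty

def combine_redundant_edges (circuit : List (List String)) (edges : List (Int × Int)) : List (List String) × (List (Int × Int)) :=
  ((pvEdgeDict circuit edges).keys.map (fun x =>
    PySem.List.sorted (PySem.Set.ofList ((pvEdgeDict circuit edges).getD x [])) (fun s => s) false),
   (pvEdgeDict circuit edges).keys)

-- ===== PORT B =====
def pvNorm (edges : List (Int × Int)) : List (Int × Int) := edges.map pvNormEdge

def pvNewEdges (edges : List (Int × Int)) : List (Int × Int) :=
  (pvNorm edges).foldl (fun acc e => if e ∈ acc then acc else acc ++ [e]) []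

def pvGather (circuit : List (List String)) (edges : List (Int × Int)) (e : Int × Int) : List String :=
  ((pvNorm edges).zip circuit).foldl (fun comps p => if p.1 = e then comps ++ p.2 else comps) []

def combine_redundant_edges_alt (circuit : List (List String)) (edges : List (Int × Int)) : List (List String) × (List (Int × Int)) :=
  ((pvNewEdges edges).map (fun e =>
    PySem.List.sorted (PySem.Set.ofList (pvGather circuit edges e)) (fun s => s) false),
   pvNewEdges edges)

-- ===== PRECONDITION & SPEC =====
-- A raises IndexError on circuit[i] when len(circuit) < len(edges); exactly those inputs are excluded.
def Pre_combine_redundant_edges (circuit : List (List String)) (edges : List (Int × Int)) : Prop :=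
  edges.length ≤ circuit.length
instance (circuit : List (List String)) (edges : List (Int × Int)) : Decidable (Pre_combine_redundant_edges circuit edges) := by unfold Pre_combine_redundant_edges; infer_instance
def pvWitness_combine_redundant_edges : List (List String) × (List (Int × Int)) :=
  ([["J"], ["L", "J"], ["C"]], [(0, 1), (1, 0), (0, 2)])

def Spec_combine_redundant_edges (circuit : List (List String)) (edges : List (Int × Int)) (out : List (List String) × (List (Int × Int))) : Prop := out = combine_redundant_edges_alt circuit edges
instance (circuit : List (List String)) (edges : List (Int × Int)) (out : List (List String) × (List (Int × Int))) : Decidable (Spec_combine_redundant_edges circuit edges out) := by unfold Spec_combine_redundant_edges; infer_instance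

-- ===== CLAIM (what is proved, stated in full; the proofs are below) =====
def Claim_equal_combine_redundant_edges : Prop := ∀ (circuit : List (List String)) (edges : List (Int × Int)), Dom_combine_redundant_edges circuit edges → Pre_combine_redundant_edges circuit edges → Spec_combine_redundant_edges circuit edges (combine_redundant_edges circuit edges)

-- ===== LEMMAS AND PROOFS =====

-- A's loop body, on already-normalized (key, comps) pairs
def pvStep (d : PySem.Dict (Int × Int) (List String)) (p : (Int × Int) × List String) : PySem.Dict (Int × Int) (List String) :=
  match d.get? p.1 with
  | some v => d.insert p.1 (v ++ p.2)
  | none => d.insert p.1 p.2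

theorem pvStep_getD (d : PySem.Dict (Int × Int) (List String)) (p : (Int × Int) × List String) (k : Int × Int) :
    (pvStep d p).getD k [] = if p.1 = k then d.getD k [] ++ p.2 else d.getD k [] := by
  unfold pvStep
  cases h : d.get? p.1 with
  | none =>
      simp only [PySem.Dict.getD_insert]
      split_ifs with h1 h2 h2
      · subst h1; simp [PySem.Dict.getD_eq_get?_getD, h]
      · exact absurd h1.symm h2
      · exact absurd h2.symm h1
      · rfl
  | some v =>
      simp only [PySem.Dict.getD_insert]
      split_ifs with h1 h2 h2
      · subst h1; simp [PySem.Dict.getD_eq_get?_getD, h]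
      · exact absurd h1.symm h2
      · exact absurd h2.symm h1
      · rfl

theorem pvStep_keys (d : PySem.Dict (Int × Int) (List String)) (p : (Int × Int) × List String) :
    (pvStep d p).keys = if p.1 ∈ d.keys then d.keys else d.keys ++ [p.1] := by
  unfold pvStep
  cases h : d.get? p.1 with
  | none =>
      have hc : d.contains p.1 = false := by
        rw [PySem.Dict.contains_eq_isSome_get?, h]; rfl
      rw [PySem.Dict.keys_insert_of_not_contains _ _ hc, if_neg]
      intro hm
      have := (PySem.Dict.contains_iff_mem_keys _ _).mpr hm
      simp [hc] at this
  | some v =>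
      have hc : d.contains p.1 = true := by
        rw [PySem.Dict.contains_eq_isSome_get?, h]; rfl
      rw [PySem.Dict.keys_insert_of_contains _ _ hc, if_pos]
      exact (PySem.Dict.contains_iff_mem_keys _ _).mp hc

theorem pvFoldl_getD (l : List ((Int × Int) × List String)) (k : Int × Int) :
    ∀ d : PySem.Dict (Int × Int) (List String),
      (l.foldl pvStep d).getD k [] =
        l.foldl (fun acc p => if p.1 = k then acc ++ p.2 else acc) (d.getD k []) := by
  induction l with
  | nil => intro d; rfl
  | cons p t ih =>
      intro d
      simp only [List.foldl_cons]
      rw [ih (pvStep d p), pvStep_getD]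

theorem pvFoldl_keys (l : List ((Int × Int) × List String)) :
    ∀ d : PySem.Dict (Int × Int) (List String),
      (l.foldl pvStep d).keys =
        l.foldl (fun acc p => if p.1 ∈ acc then acc else acc ++ [p.1]) d.keys := by
  induction l with
  | nil => intro d; rfl
  | cons p t ih =>
      intro d
      simp only [List.foldl_cons]
      rw [ih (pvStep d p), pvStep_keys]

theorem pvEdgeDict_eq (circuit : List (List String)) (edges : List (Int × Int)) :
    pvEdgeDict circuit edges =
      ((edges.zip circuit).map (fun p => (pvNormEdge p.1, p.2))).foldl pvStep PySem.Dict.empty := by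
  unfold pvEdgeDict
  rw [List.foldl_map]
  rfl

theorem pvNorm_eq (circuit : List (List String)) (edges : List (Int × Int))
    (hpre : edges.length ≤ circuit.length) :
    pvNorm edges = ((edges.zip circuit).map (fun p => (pvNormEdge p.1, p.2))).map Prod.fst := by
  unfold pvNorm
  rw [List.map_map]
  conv_lhs => rw [← List.map_fst_zip (l₂ := circuit) hpre, List.map_map]
  rfl

theorem pvKeys_eq (circuit : List (List String)) (edges : List (Int × Int))
    (hpre : edges.length ≤ circuit.length) :
    (pvEdgeDict circuit edges).keys = pvNewEdges edges := by
  rw [pvEdgeDict_eq, pvFoldl_keys]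
  unfold pvNewEdges
  rw [pvNorm_eq circuit edges hpre, List.map_map, List.foldl_map, List.foldl_map]
  rfl

theorem pvGetD_eq (circuit : List (List String)) (edges : List (Int × Int)) (k : Int × Int) :
    (pvEdgeDict circuit edges).getD k [] = pvGather circuit edges k := by
  rw [pvEdgeDict_eq, pvFoldl_getD]
  unfold pvGather pvNorm
  rw [List.zip_map_left]
  rfl

-- ===== VERDICT (by name: the statement is the Claim_ definition above) =====
theorem combine_redundant_edges_spec : Claim_equal_combine_redundant_edges := by
  intro circuit edges _ hpre
  unfold Spec_combine_redundant_edges combine_redundant_edges combine_redundant_edges_alt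
  have hkeys := pvKeys_eq circuit edges hpre
  rw [hkeys]
  refine congrArg (fun l => (l, pvNewEdges edges)) ?_
  exact List.map_congr_left (fun x _ => by rw [pvGetD_eq])
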